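-- pv_equiv track=rewrite | github.com/anitatan2003/python-problems | Build a List Practice /main.py | fun_numbers
-- ===== SOURCE A (Python) =====
-- def fun_numbers(start, end):
--     list = []
--
--     if start >= end:
--         return list
--
--     for i in range(start, end):
--         if i % 2 == 0 or i % 5 == 0:
--             list.append(i)
--
--     return list
-- ===== SOURCE B (Python) =====
-- def fun_numbers(start, end):
--     if start >= end:
--         return []
--     first2 = start + (-start) % 2
--     first5 = start + (-start) % 5
--     return sorted(set(range(first2, end, 2)) | set(range(first5, end, 5)))
-- ===== Notes on version B (the rewrite author's own statement) =====
-- stated objective: alternative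
-- what changed: Instead of scanning every integer in [start,end) and testing divisibility, B generates the two arithmetic progressions (step 2 from the first even >= start, step 5 from the first multiple of 5 >= start), dedupes multiples of 10 via a set, and returns them sorted.
import Mathlib
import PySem

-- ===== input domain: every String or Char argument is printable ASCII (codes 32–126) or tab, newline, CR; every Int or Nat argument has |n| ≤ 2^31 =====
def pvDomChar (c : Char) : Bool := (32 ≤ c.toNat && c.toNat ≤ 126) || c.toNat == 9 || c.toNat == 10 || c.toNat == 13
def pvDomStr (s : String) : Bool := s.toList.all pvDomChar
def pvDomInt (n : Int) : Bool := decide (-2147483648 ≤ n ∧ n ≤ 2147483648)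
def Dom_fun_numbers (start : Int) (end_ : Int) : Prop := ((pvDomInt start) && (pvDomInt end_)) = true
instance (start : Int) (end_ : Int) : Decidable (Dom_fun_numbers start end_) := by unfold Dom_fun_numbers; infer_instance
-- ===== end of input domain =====

-- B replaces A's single filtered scan by two arithmetic progressions (step 2 and step 5)
-- merged through a set and sorted; objective: alternative decomposition, same exact output.

-- ===== PORT A =====
def fun_numbers (start : Int) (end_ : Int) : List Int :=
  let list : List Int := []
  if start ≥ end_ then list
  else
    (PySem.List.pyRange start end_ 1).foldl
      (fun acc i => if PySem.Int.mod i 2 = 0 ∨ PySem.Int.mod i 5 = 0 then acc ++ [i] else acc)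
      list

-- ===== PORT B =====
def fun_numbers_alt (start : Int) (end_ : Int) : List Int :=
  if start ≥ end_ then []
  else
    let first2 := start + PySem.Int.mod (-start) 2
    let first5 := start + PySem.Int.mod (-start) 5
    PySem.List.sorted
      (PySem.Set.union (PySem.Set.ofList (PySem.List.pyRange first2 end_ 2))
                       (PySem.Set.ofList (PySem.List.pyRange first5 end_ 5)))
      (fun x => x) false

-- ===== PRECONDITION & SPEC =====
def Spec_fun_numbers (start : Int) (end_ : Int) (out : List Int) : Prop := out = fun_numbers_alt start end_
instance (start : Int) (end_ : Int) (out : List Int) : Decidable (Spec_fun_numbers start end_ out) := by unfold Spec_fun_numbers; infer_instance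

-- ===== CLAIM (what is proved, stated in full; the proofs are below) =====
def Claim_equal_fun_numbers : Prop := ∀ (start : Int) (end_ : Int), Dom_fun_numbers start end_ → Spec_fun_numbers start end_ (fun_numbers start end_)

-- ===== LEMMAS AND PROOFS =====

-- A's loop is the filter of the unit-step range.
theorem funA_eq_filter (start end_ : Int) (h : ¬ start ≥ end_) :
    fun_numbers start end_ =
      (PySem.List.pyRange start end_ 1).filter
        (fun i => decide (PySem.Int.mod i 2 = 0 ∨ PySem.Int.mod i 5 = 0)) := by
  simp [fun_numbers, h, PySem.List.foldl_append_ite_eq_filter]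

-- ===== VERDICT (by name: the statement is the Claim_ definition above) =====
theorem fun_numbers_spec : Claim_equal_fun_numbers := by
  intro start end_ _
  unfold Spec_fun_numbers
  by_cases h : start ≥ end_
  · simp [fun_numbers, fun_numbers_alt, h]
  · rw [funA_eq_filter start end_ h]
    unfold fun_numbers_alt
    simp only [h, if_false]
    symm
    apply PySem.List.sorted_eq_of_perm_of_pairwise_lt
    · -- permutation: both are nodup with the same members
      rw [List.perm_ext_iff_of_nodup
        (List.Nodup.filter _ (PySem.List.nodup_pyRange_one start end_))
        (PySem.Set.nodup_union _ _ (PySem.Set.nodup_ofList _))]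
      intro x
      have h2 : PySem.Int.mod x 2 = x % 2 := PySem.Int.mod_eq_emod_of_pos (by norm_num)
      have h5 : PySem.Int.mod x 5 = x % 5 := PySem.Int.mod_eq_emod_of_pos (by norm_num)
      have m2 : PySem.Int.mod (-start) 2 = (-start) % 2 := PySem.Int.mod_eq_emod_of_pos (by norm_num)
      have m5 : PySem.Int.mod (-start) 5 = (-start) % 5 := PySem.Int.mod_eq_emod_of_pos (by norm_num)
      simp only [List.mem_filter, PySem.List.mem_pyRange_one, decide_eq_true_eq,
        PySem.Set.mem_union, PySem.Set.mem_ofList,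
        PySem.List.mem_pyRange_iff_of_pos (by norm_num : (0:Int) < 2),
        PySem.List.mem_pyRange_iff_of_pos (by norm_num : (0:Int) < 5),
        h2, h5, m2, m5]
      omega
    · exact List.Pairwise.filter _ (PySem.List.pairwise_lt_pyRange_one start end_)
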